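-- pv_equiv track=rewrite | github.com/098tarik/leetcode-portfolio | Sliding_Windows/best_seller.py | best_book
-- ===== SOURCE A (Python) =====
-- def best_book(sales, k):
--     l = 0
--     r = 0
--
--     seen = {}
--
--     while r < len(sales):
--         if sales[r] not in seen:
--             seen[sales[r]] = 0
--         seen[sales[r]] += 1
--         r += 1
--
--         if r - l == k:
--             if len(seen) == k:
--                 return True
--
--             seen[sales[l]] -= 1
--             if seen[sales[l]] == 0:
--                 del seen[sales[l]]
--             l += 1
--
--     return False
-- ===== SOURCE B (Python) =====
-- def best_book(sales, k):
--     if k < 1: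
--         return False
--     return any(len(set(sales[i:i+k])) == k for i in range(len(sales) - k + 1))
-- ===== Notes on version B (the rewrite author's own statement) =====
-- stated objective: simpler
-- what changed: Replaces the two-pointer rolling multiset (dict of counts maintained incrementally) with a direct per-window check len(set(sales[i:i+k])) == k over all start indices.
import Mathlib
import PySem

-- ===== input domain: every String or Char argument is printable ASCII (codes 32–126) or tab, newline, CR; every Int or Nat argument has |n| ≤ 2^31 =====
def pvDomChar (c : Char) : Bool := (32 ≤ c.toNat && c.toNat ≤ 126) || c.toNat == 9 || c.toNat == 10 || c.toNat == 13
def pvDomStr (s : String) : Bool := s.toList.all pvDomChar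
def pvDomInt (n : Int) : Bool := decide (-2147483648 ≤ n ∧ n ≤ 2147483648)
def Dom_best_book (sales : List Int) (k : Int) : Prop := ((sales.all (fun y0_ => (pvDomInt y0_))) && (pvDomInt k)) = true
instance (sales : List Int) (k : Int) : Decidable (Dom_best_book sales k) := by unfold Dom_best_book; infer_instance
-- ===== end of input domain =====

-- B replaces A's amortized two-pointer rolling counter with a direct per-window
-- distinctness check (len(set(window)) == k over all start indices); objective: simpler.

-- ===== PORT A =====
-- the while loop of A; state (l, r, seen); fuel = sales.length - r keeps the recursion structural
def bestBookLoop (sales : List Int) (k : Int) : Nat → Nat → Nat → PySem.Dict Int Int → Bool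
  | 0, _, _, _ => false
  | fuel + 1, l, r, seen =>
    if r < sales.length then
      let x := PySem.List.pyGetD sales (r : Int) 0       -- sales[r]; r is in range here
      let seen1 := if seen.contains x then seen else seen.insert x 0
      let seen2 := seen1.insert x (seen1.getD x 0 + 1)
      if ((r : Int) + 1) - (l : Int) = k then
        if (seen2.size : Int) = k then true
        else
          let y := PySem.List.pyGetD sales (l : Int) 0   -- sales[l]; l ≤ r here, in range
          let seen3 := seen2.insert y (seen2.getD y 0 - 1)
          let seen4 := if seen3.getD y 0 = 0 then seen3.erase y else seen3
          bestBookLoop sales k fuel (l + 1) (r + 1) seen4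
      else bestBookLoop sales k fuel l (r + 1) seen2
    else false

def best_book (sales : List Int) (k : Int) : Bool :=
  bestBookLoop sales k sales.length 0 0 PySem.Dict.empty

-- ===== PORT B =====
def best_book_alt (sales : List Int) (k : Int) : Bool :=
  if k < 1 then false
  else (PySem.List.pyRange 0 ((sales.length : Int) - k + 1) 1).any
    (fun i => ((PySem.Set.ofList (PySem.List.slice sales (some i) (some (i + k)))).length : Int) == k)

-- ===== PRECONDITION & SPEC =====
def Spec_best_book (sales : List Int) (k : Int) (out : Bool) : Prop := out = best_book_alt sales k
instance (sales : List Int) (k : Int) (out : Bool) : Decidable (Spec_best_book sales k out) := by unfold Spec_best_book; infer_instance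

-- ===== CLAIM (what is proved, stated in full; the proofs are below) =====
def Claim_equal_best_book : Prop := ∀ (sales : List Int) (k : Int), Dom_best_book sales k → Spec_best_book sales k (best_book sales k)

-- ===== LEMMAS AND PROOFS =====

-- two Nodup lists with the same members have the same length
theorem pvDistinctLen (xs ys : List Int) (hx : xs.Nodup) (hy : ys.Nodup)
    (h : ∀ a, a ∈ xs ↔ a ∈ ys) : xs.length = ys.length :=
  ((List.perm_ext_iff_of_nodup hx hy).mpr h).length_eq

-- len(set(w)) == len(w) iff w has no duplicates
theorem pvSetLenIffNodup (w : List Int) :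
    (PySem.Set.ofList w).length = w.length ↔ w.Nodup := by
  have hlen : (PySem.Set.ofList w).length = w.dedup.length :=
    pvDistinctLen _ _ (PySem.Set.nodup_ofList w) (List.nodup_dedup w)
      (by intro a; simp [PySem.Set.mem_ofList, List.mem_dedup])
  constructor
  · intro h
    exact List.dedup_eq_self.mp ((List.dedup_sublist w).eq_of_length (hlen ▸ h))
  · intro h
    rw [hlen, List.dedup_eq_self.mpr h]

-- the dict invariant maintained by A's loop, and its push/pop steps
def pvInv (w : List Int) (seen : PySem.Dict Int Int) : Prop :=
  seen.keys.Nodup ∧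
    ∀ x, seen.get? x = if w.count x = 0 then (none : Option Int) else some ((w.count x : Int))

theorem pvInvContains (w : List Int) (seen : PySem.Dict Int Int) (h : pvInv w seen) (x : Int) :
    seen.contains x = decide (x ∈ w) := by
  rw [PySem.Dict.contains_eq_isSome_get?, h.2 x]
  by_cases hx : x ∈ w
  · have : w.count x ≠ 0 := by simpa [Nat.pos_iff_ne_zero] using List.count_pos_iff.mpr hx
    simp [this, hx]
  · have : w.count x = 0 := List.count_eq_zero.mpr hx
    simp [this, hx]

theorem pvInvSize (w : List Int) (seen : PySem.Dict Int Int) (h : pvInv w seen) :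
    seen.size = (PySem.Set.ofList w).length := by
  have hk : seen.size = seen.keys.length := by
    simp [PySem.Dict.size, PySem.Dict.keys]
  rw [hk]
  apply pvDistinctLen _ _ h.1 (PySem.Set.nodup_ofList w)
  intro a
  rw [PySem.Set.mem_ofList, ← PySem.Dict.contains_iff_mem_keys, pvInvContains w seen h a]
  simp

theorem pvCountAppendNe (w : List Int) (x z : Int) (hz : z ≠ x) :
    (w ++ [x]).count z = w.count z := by
  rw [List.count_append, List.count_eq_zero.mpr (show z ∉ [x] by simp [hz]), Nat.add_zero]

theorem pvCountConsNe (w : List Int) (y z : Int) (hz : z ≠ y) :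
    (y :: w).count z = w.count z := by
  rw [List.count_cons]
  simp [Ne.symm hz]

theorem pvGetErase (d : PySem.Dict Int Int) (a b : Int) :
    (d.erase a).get? b = if b = a then none else d.get? b := by
  obtain ⟨l⟩ := d
  simp only [PySem.Dict.erase, PySem.Dict.get?, List.find?_filter]
  by_cases hba : b = a
  · subst hba
    rw [if_pos rfl, List.find?_eq_none.mpr (by intro p _; simp)]
    rfl
  · rw [if_neg hba]
    congr 2
    funext p
    by_cases h1 : p.1 = a <;> by_cases h2 : p.1 = b <;> simp [h1, h2] <;> omega

theorem pvNodupKeysErase (d : PySem.Dict Int Int) (a : Int) (h : d.keys.Nodup) :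
    (d.erase a).keys.Nodup := by
  obtain ⟨l⟩ := d
  simp only [PySem.Dict.erase, PySem.Dict.keys] at h ⊢
  exact h.sublist ((List.filter_sublist (l := l)).map _)

theorem pvInvPush (w : List Int) (seen : PySem.Dict Int Int) (x : Int) (h : pvInv w seen) :
    pvInv (w ++ [x])
      ((if seen.contains x then seen else seen.insert x 0).insert x
        ((if seen.contains x then seen else seen.insert x 0).getD x 0 + 1)) := by
  have hc := pvInvContains w seen h x
  have hcx : (w ++ [x]).count x = w.count x + 1 := by simp [List.count_append]
  by_cases hx : x ∈ w
  · have hcnt : w.count x ≠ 0 := by simpa [Nat.pos_iff_ne_zero] using List.count_pos_iff.mpr hx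
    rw [hc]
    simp only [hx, decide_true, if_true]
    refine ⟨PySem.Dict.nodup_keys_insert _ _ _ h.1, ?_⟩
    intro z
    have hgd : seen.getD x 0 = (w.count x : Int) := by
      rw [PySem.Dict.getD_eq_get?_getD, h.2 x, if_neg hcnt]; rfl
    rw [PySem.Dict.get?_insert, hgd]
    by_cases hz : z = x
    · subst hz
      rw [if_pos rfl, hcx, if_neg (by omega)]
      exact congrArg some (by omega)
    · rw [if_neg hz, h.2 z, pvCountAppendNe w x z hz]
  · have hcnt : w.count x = 0 := List.count_eq_zero.mpr hx
    rw [hc]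
    simp only [hx, decide_false, Bool.false_eq_true, if_false]
    refine ⟨PySem.Dict.nodup_keys_insert _ _ _ (PySem.Dict.nodup_keys_insert _ _ _ h.1), ?_⟩
    intro z
    rw [PySem.Dict.get?_insert]
    by_cases hz : z = x
    · subst hz
      rw [if_pos rfl, PySem.Dict.getD_insert_self, hcx, hcnt, if_neg (by omega)]
      simp
    · rw [if_neg hz, PySem.Dict.get?_insert_of_ne _ _ hz, h.2 z, pvCountAppendNe w x z hz]

theorem pvInvPop (w : List Int) (y : Int) (seen : PySem.Dict Int Int) (h : pvInv (y :: w) seen) :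
    pvInv w
      (if (seen.insert y (seen.getD y 0 - 1)).getD y 0 = 0 then
        (seen.insert y (seen.getD y 0 - 1)).erase y
       else seen.insert y (seen.getD y 0 - 1)) := by
  have hcy : (y :: w).count y = w.count y + 1 := by simp
  have hgd : seen.getD y 0 = ((w.count y : Int) + 1) := by
    rw [PySem.Dict.getD_eq_get?_getD, h.2 y, if_neg (by omega), hcy]; push_cast; rfl
  have hgd3 : (seen.insert y (seen.getD y 0 - 1)).getD y 0 = (w.count y : Int) := by
    rw [PySem.Dict.getD_insert_self, hgd]; ring
  by_cases h0 : w.count y = 0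
  · rw [if_pos (by rw [hgd3, h0]; rfl)]
    refine ⟨pvNodupKeysErase _ _ (PySem.Dict.nodup_keys_insert _ _ _ h.1), ?_⟩
    intro z
    rw [pvGetErase]
    by_cases hz : z = y
    · subst hz; simp [h0]
    · rw [if_neg hz, PySem.Dict.get?_insert_of_ne _ _ hz, h.2 z, pvCountConsNe w y z hz]
  · rw [if_neg (by rw [hgd3]; exact_mod_cast h0)]
    refine ⟨PySem.Dict.nodup_keys_insert _ _ _ h.1, ?_⟩
    intro z
    rw [PySem.Dict.get?_insert]
    by_cases hz : z = y
    · subst hz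
      rw [if_pos rfl, if_neg h0, hgd]
      exact congrArg some (by omega)
    · rw [if_neg hz, h.2 z, pvCountConsNe w y z hz]

-- A's loop with non-positive k never fires the window branch and returns False
theorem pvLoopNonpos (sales : List Int) (k : Int) (hk : k < 1) :
    ∀ fuel l r seen, l ≤ r → bestBookLoop sales k fuel l r seen = false := by
  intro fuel
  induction fuel with
  | zero => intro l r seen _; rfl
  | succ n ih =>
    intro l r seen hlr
    rw [bestBookLoop]
    by_cases hr : r < sales.length
    · have hb : ¬ (((r : Int) + 1) - (l : Int) = k) := by omega
      simp only [hr, if_true, hb, if_false]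
      exact ih l (r + 1) _ (by omega)
    · simp [hr]

theorem pvTakeCons (a : Int) (t : List Int) (K : Nat) (h : 1 ≤ K) :
    (a :: t).take K = a :: t.take (K - 1) := by
  cases K with
  | zero => omega
  | succ m => simp

theorem pvWinLen (sales : List Int) (j K : Nat) (h : j + K ≤ sales.length) :
    ((sales.drop j).take K).length = K := by
  simp [List.length_take, List.length_drop]; omega


-- the main characterization of A's loop
theorem pvLoopEq (sales : List Int) (k : Int) (K : Nat) (hk : k = (K : Int)) (hK : 1 ≤ K) :
    ∀ fuel l r (seen : PySem.Dict Int Int),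
      sales.length ≤ r + fuel →
      r ≤ sales.length →
      l ≤ r →
      r - l = min r (K - 1) →
      pvInv ((sales.drop l).take (r - l)) seen →
      (bestBookLoop sales k fuel l r seen = true
        ↔ ∃ i, l ≤ i ∧ i + K ≤ sales.length ∧ ((sales.drop i).take K).Nodup) := by
  intro fuel
  induction fuel with
  | zero =>
    intro l r seen hfuel hr hlr hmin hinv
    simp only [bestBookLoop, Bool.false_eq_true, false_iff]
    rintro ⟨i, h1, h2, -⟩
    omega
  | succ fuel ih =>
    intro l r seen hfuel hr hlr hmin hinv
    by_cases hrn : r < sales.length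
    · have hx : PySem.List.pyGetD sales (r : Int) 0 = sales[r] := by
        rw [PySem.List.pyGetD_natCast]
        exact List.getD_eq_getElem sales 0 hrn
      simp only [bestBookLoop, if_pos hrn, hx]
      have hw' : (sales.drop l).take (r + 1 - l) = (sales.drop l).take (r - l) ++ [sales[r]] := by
        rw [show r + 1 - l = (r - l) + 1 by omega, List.take_add_one, List.getElem?_drop,
          show l + (r - l) = r by omega, List.getElem?_eq_getElem hrn]
        rfl
      have hinv2 := pvInvPush _ seen sales[r] hinv
      by_cases hb : ((r : Int) + 1) - (l : Int) = k
      · have hwin : (sales.drop l).take K = (sales.drop l).take (r - l) ++ [sales[r]] := by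
          rw [← hw']; congr 1; omega
        have hlen : ((sales.drop l).take (r - l) ++ [sales[r]]).length = K := by
          rw [← hwin]; exact pvWinLen sales l K (by omega)
        have hsz := pvInvSize _ _ hinv2
        by_cases hs :
            (((((if seen.contains sales[r] then seen else seen.insert sales[r] 0).insert sales[r]
              ((if seen.contains sales[r] then seen else seen.insert sales[r] 0).getD sales[r] 0 + 1))).size : Int) = k)
        · rw [if_pos hb, if_pos hs]
          simp only [true_iff]
          refine ⟨l, le_refl l, by omega, ?_⟩
          rw [hwin, ← pvSetLenIffNodup, hlen]
          omega
        · rw [if_pos hb, if_neg hs]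
          have hy : PySem.List.pyGetD sales (l : Int) 0 = sales[l]'(by omega) := by
            rw [PySem.List.pyGetD_natCast]
            exact List.getD_eq_getElem sales 0 (by omega)
          rw [hy]
          have hnod : ¬ ((sales.drop l).take K).Nodup := by
            intro hnd
            rw [hwin] at hnd
            have h5 := (pvSetLenIffNodup _).mpr hnd
            omega
          have hcons : (sales.drop l).take (r - l) ++ [sales[r]]
              = sales[l]'(by omega) :: ((sales.drop (l + 1)).take (K - 1)) := by
            rw [← hwin, List.drop_eq_getElem_cons (by omega), pvTakeCons _ _ _ hK]
          rw [hcons] at hinv2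
          have hinv4 := pvInvPop _ _ _ hinv2
          rw [ih (l + 1) (r + 1) _ (by omega) (by omega) (by omega) (by omega)
            (by rw [show r + 1 - (l + 1) = K - 1 by omega]; exact hinv4)]
          constructor
          · rintro ⟨i, h1, h2, h3⟩
            exact ⟨i, by omega, h2, h3⟩
          · rintro ⟨i, h1, h2, h3⟩
            refine ⟨i, ?_, h2, h3⟩
            rcases Nat.eq_or_lt_of_le h1 with h | h
            · exact absurd (h ▸ h3) hnod
            · omega
      · rw [if_neg hb]
        rw [ih l (r + 1) _ (by omega) (by omega) (by omega) (by omega) (by rw [← hw'] at hinv2; exact hinv2)]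
    · simp only [bestBookLoop, if_neg hrn, Bool.false_eq_true, false_iff]
      rintro ⟨i, h1, h2, -⟩
      omega

-- characterization of B
theorem pvAltEq (sales : List Int) (k : Int) (K : Nat) (hk : k = (K : Int)) (hK : 1 ≤ K) :
    (best_book_alt sales k = true
      ↔ ∃ i, i + K ≤ sales.length ∧ ((sales.drop i).take K).Nodup) := by
  rw [best_book_alt, if_neg (by omega)]
  rw [List.any_eq_true]
  constructor
  · rintro ⟨i, hmem, hf⟩
    obtain ⟨h0, hlt⟩ := (PySem.List.mem_pyRange_one).mp hmem
    obtain ⟨j, rfl⟩ : ∃ j : Nat, i = (j : Int) := ⟨i.toNat, by omega⟩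
    refine ⟨j, by omega, ?_⟩
    have hsl : PySem.List.slice sales (some (j : Int)) (some ((j : Int) + k)) = (sales.drop j).take K := by
      rw [PySem.List.slice_toNat (ha := by omega) (hb := by omega)]
      congr 1
      omega
    rw [hsl, beq_iff_eq] at hf
    have hlen : ((sales.drop j).take K).length = K := pvWinLen sales j K (by omega)
    rw [← pvSetLenIffNodup, hlen]
    omega
  · rintro ⟨j, hle, hnd⟩
    refine ⟨(j : Int), PySem.List.mem_pyRange_one.mpr ⟨by omega, by omega⟩, ?_⟩
    have hsl : PySem.List.slice sales (some (j : Int)) (some ((j : Int) + k)) = (sales.drop j).take K := by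
      rw [PySem.List.slice_toNat (ha := by omega) (hb := by omega)]
      congr 1
      omega
    rw [hsl, beq_iff_eq]
    have hlen : ((sales.drop j).take K).length = K := pvWinLen sales j K hle
    have := (pvSetLenIffNodup _).mpr hnd
    omega

-- ===== VERDICT (by name: the statement is the Claim_ definition above) =====
theorem best_book_spec : Claim_equal_best_book := by
  intro sales k _
  unfold Spec_best_book
  by_cases hk : k < 1
  · rw [best_book, pvLoopNonpos sales k hk sales.length 0 0 _ (le_refl 0),
      best_book_alt, if_pos hk]
  · have hK : k = ((k.toNat : Nat) : Int) := by omega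
    have h1 : 1 ≤ k.toNat := by omega
    rw [best_book, Bool.eq_iff_iff]
    rw [pvLoopEq sales k k.toNat hK h1 sales.length 0 0 PySem.Dict.empty
        (by omega) (by omega) (le_refl 0) (by simp)
        (by constructor
            · exact PySem.Dict.nodup_keys_empty
            · intro x; simp [PySem.Dict.get?_empty]),
      pvAltEq sales k k.toNat hK h1]
    constructor
    · rintro ⟨i, _, h2, h3⟩; exact ⟨i, h2, h3⟩
    · rintro ⟨i, h2, h3⟩; exact ⟨i, Nat.zero_le i, h2, h3⟩
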